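-- pv_equiv track=rewrite | github.com/124476/Ege | task_12/code_task_1.py | f
-- ===== SOURCE A (Python) =====
-- mp = {
--     (" ", 0): (" ", -1, 1),
--     (" ", 1): (" ", 2, 1),
--     ("0", 1): ("1", -1, 1),
--     ("1", 1): ("0", -1, 1),
-- }  # команды
--
-- def f(m):
--     a = list(" " + m + " ")
--
--     q = 0
--     i = len(a) - 1
--
--     while True:
--         c = mp[(a[i], q)]
--         a[i] = c[0]
--         if c[1] == 2: break
--         i += c[1]
--         q = c[2]
--
--     return "".join(a)
-- ===== SOURCE B (Python) =====
-- def f(m):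
--     flip = {"0": "1", "1": "0"}
--     head, sep, tail = (" " + m).rpartition(" ")
--     return head + sep + "".join(flip[c] for c in tail) + " "
-- ===== Notes on version B (the rewrite author's own statement) =====
-- stated objective: simpler
-- what changed: Replaces the stateful cell-by-cell Turing-machine loop (transition table, head index, state register) with an rpartition at the last space followed by a single forward flip pass over the suffix.
import Mathlib
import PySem

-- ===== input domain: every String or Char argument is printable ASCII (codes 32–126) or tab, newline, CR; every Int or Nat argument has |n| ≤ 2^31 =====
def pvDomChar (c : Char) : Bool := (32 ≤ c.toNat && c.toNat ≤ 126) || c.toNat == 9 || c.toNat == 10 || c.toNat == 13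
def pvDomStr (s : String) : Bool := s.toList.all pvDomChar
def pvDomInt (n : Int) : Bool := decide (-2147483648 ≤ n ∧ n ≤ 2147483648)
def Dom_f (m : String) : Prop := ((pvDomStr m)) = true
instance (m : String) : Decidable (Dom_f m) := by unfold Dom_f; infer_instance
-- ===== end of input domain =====

-- B replaces A's stateful Turing-machine loop by an rpartition at the last space plus one
-- forward flip pass over the suffix (objective: simpler; no argument is mutated).

-- ===== PORT A =====
-- the transition table mp; none = KeyError
def mpLookup (c : Char) (q : Int) : Option (Char × Int × Int) :=
  if c = ' ' ∧ q = 0 then some (' ', -1, 1)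
  else if c = ' ' ∧ q = 1 then some (' ', 2, 1)
  else if c = '0' ∧ q = 1 then some ('1', -1, 1)
  else if c = '1' ∧ q = 1 then some ('0', -1, 1)
  else none

-- the 'while True' loop; fuel only for termination (never exhausted on Pre_);
-- on KeyError (no mp entry) the port stops — those inputs are outside Pre_f
def fLoop : Nat → List Char → Int → Int → List Char
  | 0, a, _, _ => a
  | fuel+1, a, i, q =>
    match PySem.List.pyGet? a i with
    | none => a
    | some ch =>
      match mpLookup ch q with
      | none => a
      | some (w, d, q') =>
        let a' := PySem.List.pySetD a i w
        if d = 2 then a' else fLoop fuel a' (i + d) q'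

def f (m : String) : String :=
  let a := (" " ++ m ++ " ").toList
  String.mk (fLoop (a.length + 1) a ((a.length : Int) - 1) 0)

-- ===== PORT B =====
-- flip[c]; on KeyError returns c (only reachable outside Pre_f)
def flipChar (c : Char) : Char := if c = '0' then '1' else if c = '1' then '0' else c

-- (" " + m).rpartition(" "): head++sep = up to and including the last space, tail = after it
def f_alt (m : String) : String :=
  let rev := (' ' :: m.toList).reverse
  let tail := (rev.takeWhile (· ≠ ' ')).reverse
  let headsep := (rev.dropWhile (· ≠ ' ')).reverse
  String.mk (headsep ++ tail.map flipChar ++ [' '])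

-- ===== PRECONDITION & SPEC =====
-- Pre_f excludes exactly the inputs where A raises KeyError: a non-binary character in the
-- suffix of m after its last space (the region the machine visits before halting).
def Pre_f (m : String) : Prop :=
  (m.toList.reverse.takeWhile (· ≠ ' ')).all (fun c => c == '0' || c == '1') = true
instance (m : String) : Decidable (Pre_f m) := by unfold Pre_f; infer_instance
def pvWitness_f : String := "10"
def Spec_f (m : String) (out : String) : Prop := out = f_alt m
instance (m : String) (out : String) : Decidable (Spec_f m out) := by unfold Spec_f; infer_instance

-- ===== CLAIM (what is proved, stated in full; the proofs are below) =====
def Claim_equal_f : Prop := ∀ (m : String), Dom_f m → Pre_f m → Spec_f m (f m)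

-- ===== LEMMAS AND PROOFS =====

theorem pySet_mid (p s : List Char) (x y : Char) :
    PySem.List.pySetD (p ++ x :: s) (p.length : Int) y = p ++ y :: s := by
  rw [PySem.List.pySetD_natCast]
  induction p with
  | nil => simp
  | cons a p ih => simpa using ih

theorem fLoop_step (fuel : Nat) (Q s : List Char) (c w : Char) (d q' q : Int)
    (h : mpLookup c q = some (w, d, q')) (hd : ¬ d = 2) :
    fLoop (fuel+1) (Q ++ c :: s) (Q.length : Int) q
      = fLoop fuel (Q ++ w :: s) ((Q.length : Int) + d) q' := by
  simp only [fLoop, PySem.List.pyGet?_append_length, h]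
  rw [if_neg hd, pySet_mid]

theorem fLoop_halt (fuel : Nat) (Q s : List Char) (c w : Char) (q' q : Int)
    (h : mpLookup c q = some (w, 2, q')) :
    fLoop (fuel+1) (Q ++ c :: s) (Q.length : Int) q = Q ++ w :: s := by
  simp only [fLoop, PySem.List.pyGet?_append_length, h]
  simp [pySet_mid]

theorem fLoop_q1 (b : List Char) : ∀ (P suf : List Char) (fuel : Nat),
    (∀ c ∈ b, c = '0' ∨ c = '1') → b.length + 1 ≤ fuel →
    fLoop fuel (P ++ ' ' :: b ++ suf) ((P.length + b.length : Nat) : Int) 1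
      = P ++ ' ' :: b.map flipChar ++ suf := by
  induction b using List.reverseRecOn with
  | nil =>
    intro P suf fuel _ hfuel
    match fuel, hfuel with
    | fuel+1, _ =>
      simp only [List.length_nil, Nat.add_zero, List.append_assoc, List.cons_append,
        List.nil_append]
      rw [fLoop_halt fuel P suf ' ' ' ' 1 1 (by decide)]
      simp
  | append_singleton b' c ih =>
    intro P suf fuel hbin hfuel
    match fuel, hfuel with
    | fuel+1, hfuel =>
      have hc : c = '0' ∨ c = '1' := hbin c (by simp)
      have hstep : mpLookup c 1 = some (flipChar c, -1, 1) := by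
        rcases hc with h | h <;> simp [h, mpLookup, flipChar]
      have hre : P ++ ' ' :: (b' ++ [c]) ++ suf = (P ++ ' ' :: b') ++ c :: suf := by simp
      have hlen : ((P.length + (b' ++ [c]).length : Nat) : Int)
          = ((P ++ ' ' :: b').length : Int) := by
        simp only [List.length_append, List.length_cons, List.length_nil]
        try push_cast
        try ring
      rw [hre, hlen,
        fLoop_step fuel (P ++ ' ' :: b') suf c (flipChar c) (-1) 1 1 hstep (by decide)]
      have hidx : ((P ++ ' ' :: b').length : Int) + (-1)
          = ((P.length + b'.length : Nat) : Int) := by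
        simp only [List.length_append, List.length_cons]
        push_cast; ring
      rw [hidx, ih P (flipChar c :: suf) fuel
        (fun x hx => hbin x (by simp [hx]))
        (by simp only [List.length_append, List.length_cons, List.length_nil] at hfuel; omega)]
      simp
-- the first step (q = 0 on the trailing blank), then the q = 1 run
theorem fLoop_full (P b : List Char) (fuel : Nat)
    (hbin : ∀ c ∈ b, c = '0' ∨ c = '1') (hfuel : b.length + 2 ≤ fuel) :
    fLoop fuel (P ++ ' ' :: b ++ [' '])
        (((P ++ ' ' :: b ++ [' ']).length : Int) - 1) 0
      = P ++ ' ' :: b.map flipChar ++ [' '] := by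
  match fuel, hfuel with
  | fuel+1, hfuel =>
    have hlen : ((P ++ ' ' :: b ++ [' ']).length : Int) - 1
        = ((P ++ ' ' :: b).length : Int) := by
      simp only [List.length_append, List.length_cons, List.length_nil]
      push_cast; ring
    rw [hlen, fLoop_step fuel (P ++ ' ' :: b) [] ' ' ' ' (-1) 1 0 (by decide) (by decide)]
    have hidx : ((P ++ ' ' :: b).length : Int) + (-1)
        = ((P.length + b.length : Nat) : Int) := by
      simp only [List.length_append, List.length_cons]
      push_cast; ring
    rw [hidx, fLoop_q1 b P [' '] fuel hbin (by omega)]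

theorem takeWhile_append_stop {p : Char → Bool} (r s : List Char) (x : Char)
    (hr : ∀ c ∈ r, p c) (hx : ¬ p x) :
    (r ++ x :: s).takeWhile p = r ∧ (r ++ x :: s).dropWhile p = x :: s := by
  induction r with
  | nil => simp [List.takeWhile, List.dropWhile, hx]
  | cons a r ih =>
    have ha : p a := hr a (by simp)
    have := ih (fun c hc => hr c (by simp [hc]))
    simp [ha, this.1, this.2]

theorem dropWhile_head_false {p : Char → Bool} :
    ∀ (l : List Char) (x : Char) (d' : List Char), l.dropWhile p = x :: d' → p x = false := by
  intro l
  induction l with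
  | nil => intro x d' h; simp [List.dropWhile] at h
  | cons a l ih =>
    intro x d' h
    by_cases hpa : p a = true
    · rw [List.dropWhile_cons_of_pos hpa] at h
      exact ih x d' h
    · rw [List.dropWhile_cons_of_neg hpa] at h
      cases h
      simpa using hpa

theorem toList_decomp (m : String) :
    (" " ++ m ++ " ").toList = ' ' :: m.toList ++ [' '] := by
  simp

theorem f_spec_aux (m : String) (h : Pre_f m) : f m = f_alt m := by
  unfold f f_alt Pre_f at *
  simp only [List.all_eq_true, Bool.or_eq_true, beq_iff_eq] at h
  dsimp only
  rw [toList_decomp, List.reverse_cons]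
  set R := m.toList.reverse.takeWhile (· ≠ ' ') with hR
  have hbin : ∀ c ∈ R.reverse, c = '0' ∨ c = '1' :=
    fun c hc => h c (List.mem_reverse.mp hc)
  have hrne : ∀ c ∈ R, (fun c => decide (c ≠ ' ')) c = true := by
    intro c hc
    rw [hR] at hc
    exact List.mem_takeWhile_imp (p := fun c => decide (c ≠ ' ')) hc
  have hrd : m.toList.reverse = R ++ m.toList.reverse.dropWhile (· ≠ ' ') := by
    rw [hR]
    exact (List.takeWhile_append_dropWhile).symm
  cases hdc : m.toList.reverse.dropWhile (· ≠ ' ') with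
  | nil =>
    rw [hdc, List.append_nil] at hrd
    have ht : m.toList = R.reverse := by
      rw [← List.reverse_reverse m.toList, hrd]
    have htk := takeWhile_append_stop (p := fun c => decide (c ≠ ' ')) R [] ' ' hrne (by simp)
    rw [hrd, htk.1, htk.2]
    rw [show ' ' :: m.toList ++ [' '] = [] ++ ' ' :: R.reverse ++ [' '] from by rw [ht]; simp]
    rw [fLoop_full [] R.reverse _ hbin
      (by simp only [List.length_append, List.length_cons, List.length_nil,
            List.length_reverse]; omega)]
    exact congrArg String.mk (by simp)
  | cons x d' =>
    have hx : x = ' ' := by simpa using dropWhile_head_false _ _ _ hdc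
    subst hx
    rw [hdc] at hrd
    have ht : m.toList = (R ++ ' ' :: d').reverse := by
      rw [← hrd, List.reverse_reverse]
    have htk := takeWhile_append_stop (p := fun c => decide (c ≠ ' ')) R (d' ++ [' ']) ' '
      hrne (by simp)
    rw [hrd]
    rw [show (R ++ ' ' :: d') ++ [' '] = R ++ ' ' :: (d' ++ [' ']) from by simp]
    rw [htk.1, htk.2]
    rw [show ' ' :: m.toList ++ [' '] = (' ' :: d'.reverse) ++ ' ' :: R.reverse ++ [' ']
      from by rw [ht]; simp]
    rw [fLoop_full (' ' :: d'.reverse) R.reverse _ hbin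
      (by simp only [List.length_append, List.length_cons, List.length_nil,
            List.length_reverse]; omega)]
    exact congrArg String.mk (by simp)

-- ===== VERDICT (by name: the statement is the Claim_ definition above) =====
theorem f_spec : Claim_equal_f := by
  intro m _ hpre
  unfold Spec_f
  exact f_spec_aux m hpre
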